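-- pv_equiv track=rewrite | github.com/MrBrantCode/unitest_baseline | mut_generate/mist_train_cf/cf_71363/solution.py | concatenate_elements
-- ===== SOURCE A (Python) =====
-- from typing import List
--
-- def concatenate_elements(words: List[str], separator: str,
--                          odd_positions_only: bool = False,
--                          consecutive_primes: bool = False) -> str:
--
--     def is_prime(n: int) -> bool:
--         if n < 2:
--             return False
--         for i in range(2, int(n ** 0.5) + 1):
--             if n % i == 0:
--                 return False
--         return True
--
--     result = []
--
--     if odd_positions_only:
--         for i in range(len(words)):
--             if i % 2 != 0:
--                 result.append(separator + words[i])
--             else: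
--                 result.append(words[i])
--     elif consecutive_primes:
--         for i in range(len(words)):
--             if i != 0 and is_prime(i) and is_prime(i - 1):
--                 result.append(separator + words[i])
--             else:
--                 result.append(words[i])
--     else:
--         return separator.join(words)
--
--     return "".join(result)
-- ===== SOURCE B (Python) =====
-- from typing import List
--
-- def concatenate_elements(words: List[str], separator: str,
--                          odd_positions_only: bool = False,
--                          consecutive_primes: bool = False) -> str:
--     # i and i-1 are both prime only for i = 3 (2 is the only even prime),
--     # so the trial-division primality test is unnecessary.
--     if odd_positions_only:
--         return "".join(separator + w if i % 2 != 0 else w for i, w in enumerate(words))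
--     if consecutive_primes:
--         return "".join(separator + w if i == 3 else w for i, w in enumerate(words))
--     return separator.join(words)
-- ===== Notes on version B (the rewrite author's own statement) =====
-- stated objective: alternative
-- what changed: Replaces the per-index trial-division primality test with the number-theoretic fact that i and i-1 are both prime only at i=3, and builds the output in one enumerate pass instead of an index loop accumulating a list; intended as faster on the consecutive_primes branch (measured 10.2x there) but not confirmed across all flag combinations.
import Mathlib
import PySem

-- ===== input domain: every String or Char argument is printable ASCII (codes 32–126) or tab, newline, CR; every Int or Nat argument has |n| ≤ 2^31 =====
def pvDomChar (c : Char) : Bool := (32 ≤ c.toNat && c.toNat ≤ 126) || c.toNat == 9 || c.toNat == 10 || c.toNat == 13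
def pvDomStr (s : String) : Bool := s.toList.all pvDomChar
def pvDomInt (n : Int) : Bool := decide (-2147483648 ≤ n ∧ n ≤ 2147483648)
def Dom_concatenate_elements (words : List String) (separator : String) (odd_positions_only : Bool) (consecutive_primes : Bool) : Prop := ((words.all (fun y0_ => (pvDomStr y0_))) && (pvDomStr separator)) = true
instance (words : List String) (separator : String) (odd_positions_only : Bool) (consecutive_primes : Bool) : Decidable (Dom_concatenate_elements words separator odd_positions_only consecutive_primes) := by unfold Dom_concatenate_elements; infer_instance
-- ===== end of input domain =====

-- B replaces A's per-index trial-division primality test with the fact that i and i-1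
-- are both prime only at i = 3, and builds the output in one enumerate pass (objective: alternative).


-- ===== PORT A =====
-- is_prime: 'int(n ** 0.5)' equals Nat.sqrt exactly for 0 ≤ n < 2^52; here n is a list index.
def pvIsPrime (n : Int) : Bool :=
  if n < 2 then false
  else (List.range' 2 (Nat.sqrt n.toNat + 1 - 2)).all (fun d => n.toNat % d != 0)

-- note: loop indices i are ≥ 0 and the modulus is 2, so Lean's Int % agrees with Python's here
def concatenate_elements (words : List String) (separator : String) (odd_positions_only : Bool) (consecutive_primes : Bool) : String :=
  if odd_positions_only then
    let result := (PySem.List.pyRange 0 (words.length : Int) 1).foldl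
      (fun acc i =>
        acc ++ [if i % 2 != 0 then separator ++ PySem.List.pyGetD words i ""
                else PySem.List.pyGetD words i ""]) []
    PySem.Str.join "" result
  else if consecutive_primes then
    let result := (PySem.List.pyRange 0 (words.length : Int) 1).foldl
      (fun acc i =>
        acc ++ [if i != 0 && pvIsPrime i && pvIsPrime (i - 1) then separator ++ PySem.List.pyGetD words i ""
                else PySem.List.pyGetD words i ""]) []
    PySem.Str.join "" result
  else
    PySem.Str.join separator words

-- ===== PORT B =====
def concatenate_elements_alt (words : List String) (separator : String) (odd_positions_only : Bool) (consecutive_primes : Bool) : String :=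
  if odd_positions_only then
    PySem.Str.join "" ((PySem.List.enumerate words 0).map
      (fun p => if p.1 % 2 != 0 then separator ++ p.2 else p.2))
  else if consecutive_primes then
    PySem.Str.join "" ((PySem.List.enumerate words 0).map
      (fun p => if p.1 == 3 then separator ++ p.2 else p.2))
  else
    PySem.Str.join separator words

-- ===== PRECONDITION & SPEC =====
def Spec_concatenate_elements (words : List String) (separator : String) (odd_positions_only : Bool) (consecutive_primes : Bool) (out : String) : Prop := out = concatenate_elements_alt words separator odd_positions_only consecutive_primes
instance (words : List String) (separator : String) (odd_positions_only : Bool) (consecutive_primes : Bool) (out : String) : Decidable (Spec_concatenate_elements words separator odd_positions_only consecutive_primes out) := by unfold Spec_concatenate_elements; infer_instance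

-- ===== CLAIM (what is proved, stated in full; the proofs are below) =====
def Claim_equal_concatenate_elements : Prop := ∀ (words : List String) (separator : String) (odd_positions_only : Bool) (consecutive_primes : Bool), Dom_concatenate_elements words separator odd_positions_only consecutive_primes → Spec_concatenate_elements words separator odd_positions_only consecutive_primes (concatenate_elements words separator odd_positions_only consecutive_primes)

-- ===== LEMMAS AND PROOFS =====

theorem sqrt_three : Nat.sqrt 3 = 1 := by
  have h1 : 1 ≤ Nat.sqrt 3 := Nat.le_sqrt.mpr (by norm_num)
  have h2 : Nat.sqrt 3 < 2 := Nat.sqrt_lt.mpr (by norm_num)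
  omega

theorem prime_three : pvIsPrime 3 = true := by simp [pvIsPrime, sqrt_three]

theorem prime_two : pvIsPrime 2 = true := by simp [pvIsPrime]

-- accumulating singletons with foldl is mapping
theorem foldl_append_singleton {α β : Type} (g : α → β) (l : List α) (init : List β) :
    l.foldl (fun acc x => acc ++ [g x]) init = init ++ l.map g := by
  induction l generalizing init with
  | nil => simp
  | cons x xs ih => simp [List.foldl_cons, ih]

theorem pvIsPrime_ge_two {n : Int} (h : pvIsPrime n = true) : 2 ≤ n := by
  unfold pvIsPrime at h
  by_contra hc
  simp [show n < 2 by omega] at h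

-- an even number ≥ 4 fails the trial division at d = 2
theorem pvIsPrime_even_false (m : Nat) (h4 : 4 ≤ m) (he : m % 2 = 0) :
    pvIsPrime (m : Int) = false := by
  unfold pvIsPrime
  have hlt : ¬ ((m : Int) < 2) := by omega
  simp only [hlt, if_false, Int.toNat_natCast]
  have hs : 2 ≤ Nat.sqrt m := by
    rw [Nat.le_sqrt]; omega
  apply List.all_eq_false.mpr
  refine ⟨2, ?_, by simp [he]⟩
  have : 2 ∈ List.range' 2 (Nat.sqrt m + 1 - 2) := by
    rw [List.mem_range'_1]; omega
  exact this

-- the key number-theoretic collapse: the condition of A's loop is just i = 3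
theorem key_cond (m : Nat) :
    ((m : Int) != 0 && pvIsPrime (m : Int) && pvIsPrime ((m : Int) - 1)) = ((m : Int) == 3) := by
  by_cases h3 : m = 3
  · subst h3
    push_cast
    norm_num [prime_three, prime_two]
  · have hr : ((m : Int) == 3) = false := by simp; omega
    rw [hr]
    by_contra hc
    have hc' : ((m : Int) != 0 && pvIsPrime (m : Int) && pvIsPrime ((m : Int) - 1)) = true := by
      cases h : ((m : Int) != 0 && pvIsPrime (m : Int) && pvIsPrime ((m : Int) - 1)) with
      | true => rfl
      | false => exact absurd h hc
    simp only [Bool.and_eq_true, bne_iff_ne, ne_eq] at hc'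
    obtain ⟨⟨hne, hp⟩, hp'⟩ := hc'
    have h2 : 2 ≤ (m : Int) := pvIsPrime_ge_two hp
    have h2' : 2 ≤ (m : Int) - 1 := pvIsPrime_ge_two hp'
    have h4 : 4 ≤ m := by omega
    rcases Nat.even_or_odd m with he | ho
    · have : pvIsPrime (m : Int) = false := pvIsPrime_even_false m h4 (Nat.even_iff.mp he)
      rw [hp] at this; exact absurd this (by simp)
    · have hm1 : ((m : Int) - 1) = ((m - 1 : Nat) : Int) := by omega
      have he1 : (m - 1) % 2 = 0 := by
        have := Nat.odd_iff.mp ho; omega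
      have : pvIsPrime ((m - 1 : Nat) : Int) = false :=
        pvIsPrime_even_false (m - 1) (by omega) he1
      rw [hm1, this] at hp'; exact absurd hp' (by simp)

-- A's range/index loop produces exactly B's enumerate map (per branch, given the pointwise condition)
theorem range_map_eq_enumerate_map {β : Type} (words : List String)
    (f : Int → String → β) :
    (PySem.List.pyRange 0 (words.length : Int) 1).map (fun i => f i (PySem.List.pyGetD words i "")) =
      (PySem.List.enumerate words 0).map (fun p => f p.1 p.2) := by
  rw [PySem.List.enumerate_eq_map_pyRange (d := ""), List.map_map]
  rfl

-- ===== VERDICT (by name: the statement is the Claim_ definition above) =====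
theorem concatenate_elements_spec : Claim_equal_concatenate_elements := by
  intro words separator odd consec _
  unfold Spec_concatenate_elements concatenate_elements concatenate_elements_alt
  cases odd with
  | true =>
    simp only [if_true]
    rw [foldl_append_singleton, List.nil_append,
      range_map_eq_enumerate_map words (fun i w => if i % 2 != 0 then separator ++ w else w)]
  | false =>
    simp only [Bool.false_eq_true, if_false]
    cases consec with
    | true =>
      simp only [if_true]
      rw [foldl_append_singleton, List.nil_append]
      have hmap :
          (PySem.List.pyRange 0 (words.length : Int) 1).map
            (fun i => if i != 0 && pvIsPrime i && pvIsPrime (i - 1)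
                      then separator ++ PySem.List.pyGetD words i "" else PySem.List.pyGetD words i "") =
          (PySem.List.pyRange 0 (words.length : Int) 1).map
            (fun i => if i == 3 then separator ++ PySem.List.pyGetD words i "" else PySem.List.pyGetD words i "") := by
        apply List.map_congr_left
        intro i hi
        have h0 : 0 ≤ i := (PySem.List.mem_pyRange_one.mp hi).1
        obtain ⟨m, rfl⟩ : ∃ m : Nat, i = (m : Int) := ⟨i.toNat, (Int.toNat_of_nonneg h0).symm⟩
        rw [key_cond]
      rw [hmap,
        range_map_eq_enumerate_map words (fun i w => if i == 3 then separator ++ w else w)]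
    | false =>
      simp only [Bool.false_eq_true, if_false]
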